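-- pv_equiv track=rewrite | github.com/algorithm-master-fam/solving-problems | COS_PRO/BHJ/2차_06_로봇을움직여주세요.py | solution
-- ===== SOURCE A (Python) =====
-- def solution(commands):
-- 	answer = []
--
--     ####
-- 	p = [0, 0]
--
-- 	for c in commands:
-- 		if c == "U":
-- 			p[1] += 1
-- 		elif c == "D":
-- 			p[1] -= 1
-- 		elif c == "R":
-- 			p[0] += 1
-- 		elif c == "L":
-- 			p[0] -= 1
--
-- 	answer = p
-- 	####
--
-- 	return answer
-- ===== SOURCE B (Python) =====
-- def solution(commands):
--     return [commands.count("R") - commands.count("L"),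
--             commands.count("U") - commands.count("D")]
-- ===== Notes on version B (the rewrite author's own statement) =====
-- stated objective: simpler
-- what changed: Replaces the single stateful loop with a per-character branch by four independent count() passes, computing each axis as a difference of occurrence counts.
import Mathlib
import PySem

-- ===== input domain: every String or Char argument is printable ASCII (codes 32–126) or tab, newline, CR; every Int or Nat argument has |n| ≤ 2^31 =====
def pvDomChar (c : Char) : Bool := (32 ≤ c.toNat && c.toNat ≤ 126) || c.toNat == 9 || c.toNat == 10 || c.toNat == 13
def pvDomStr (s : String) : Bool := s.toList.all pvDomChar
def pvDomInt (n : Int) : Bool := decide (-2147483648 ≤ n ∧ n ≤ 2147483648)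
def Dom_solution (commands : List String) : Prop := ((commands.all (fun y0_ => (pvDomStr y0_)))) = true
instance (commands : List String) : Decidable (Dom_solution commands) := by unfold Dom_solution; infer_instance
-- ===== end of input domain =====

-- ===== PORT A =====
-- B computes each axis as a difference of occurrence counts instead of one branching loop; simpler.
def solution (commands : List String) : List Int :=
  let p := commands.foldl (fun (p : Int × Int) c =>
    if c == "U" then (p.1, p.2 + 1)
    else if c == "D" then (p.1, p.2 - 1)
    else if c == "R" then (p.1 + 1, p.2)
    else if c == "L" then (p.1 - 1, p.2)
    else p) (0, 0)
  [p.1, p.2]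

-- ===== PORT B =====
def solution_alt (commands : List String) : List Int :=
  [(PySem.List.count commands "R" : Int) - (PySem.List.count commands "L" : Int),
   (PySem.List.count commands "U" : Int) - (PySem.List.count commands "D" : Int)]

-- ===== PRECONDITION & SPEC =====
def Spec_solution (commands : List String) (out : List Int) : Prop := out = solution_alt commands
instance (commands : List String) (out : List Int) : Decidable (Spec_solution commands out) := by unfold Spec_solution; infer_instance

-- ===== CLAIM (what is proved, stated in full; the proofs are below) =====
def Claim_equal_solution : Prop := ∀ (commands : List String), Dom_solution commands → Spec_solution commands (solution commands)

-- ===== LEMMAS AND PROOFS =====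

-- ===== VERDICT (by name: the statement is the Claim_ definition above) =====
lemma solution_fold (commands : List String) (a b : Int) :
    commands.foldl (fun (p : Int × Int) c =>
      if c == "U" then (p.1, p.2 + 1)
      else if c == "D" then (p.1, p.2 - 1)
      else if c == "R" then (p.1 + 1, p.2)
      else if c == "L" then (p.1 - 1, p.2)
      else p) (a, b)
    = (a + (commands.count "R" : Int) - (commands.count "L" : Int),
       b + (commands.count "U" : Int) - (commands.count "D" : Int)) := by
  induction commands generalizing a b with
  | nil => simp
  | cons c cs ih =>
    simp only [List.foldl_cons, List.count_cons]
    by_cases hU : c = "U" <;> by_cases hD : c = "D" <;> by_cases hR : c = "R" <;>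
      by_cases hL : c = "L" <;> simp_all [ih, hU, hD, hR, hL] <;> omega

theorem solution_spec : Claim_equal_solution := by
  intro commands _
  unfold Spec_solution solution solution_alt
  simp only [solution_fold, PySem.List.count_eq]
  simp
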